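-- pv_equiv track=rewrite | github.com/Elisabethhui/test_agent_cc | grouping.py | group_by_api_round
-- ===== SOURCE A (Python) =====
-- from typing import List
--
-- def group_by_api_round(messages: List[dict]) -> List[List[dict]]:
--     groups = []
--     current = []
--     last_aid = None
--     for msg in messages:
--         role = msg.get("role")
--         mid = msg.get("id")
--         if role == "assistant" and mid != last_aid and current:
--             groups.append(current)
--             current = [msg]
--             last_aid = mid
--         else:
--             current.append(msg)
--         if role == "assistant":
--             last_aid = mid
--     if current:
--         groups.append(current)
--     return groups
-- ===== SOURCE B (Python) =====
-- from typing import List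
--
-- def group_by_api_round(messages: List[dict]) -> List[List[dict]]:
--     # Pass 1: boundary indices where a new API round starts.
--     bounds = []
--     last_aid = None
--     for i, msg in enumerate(messages):
--         if msg.get("role") == "assistant":
--             mid = msg.get("id")
--             if mid != last_aid and i > 0:
--                 bounds.append(i)
--             last_aid = mid
--     # Pass 2: partition messages at the boundaries.
--     groups = []
--     prev = 0
--     for b in bounds:
--         groups.append(messages[prev:b])
--         prev = b
--     if messages:
--         groups.append(messages[prev:])
--     return groups
-- ===== Notes on version B (the rewrite author's own statement) =====
-- stated objective: alternative
-- what changed: Replaces A's interleaved accumulate-emit state machine (groups/current lists mutated while scanning) with a two-pass decomposition: first compute the list of boundary indices where a new round starts, then partition the messages by slicing at those boundaries.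
import Mathlib
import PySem

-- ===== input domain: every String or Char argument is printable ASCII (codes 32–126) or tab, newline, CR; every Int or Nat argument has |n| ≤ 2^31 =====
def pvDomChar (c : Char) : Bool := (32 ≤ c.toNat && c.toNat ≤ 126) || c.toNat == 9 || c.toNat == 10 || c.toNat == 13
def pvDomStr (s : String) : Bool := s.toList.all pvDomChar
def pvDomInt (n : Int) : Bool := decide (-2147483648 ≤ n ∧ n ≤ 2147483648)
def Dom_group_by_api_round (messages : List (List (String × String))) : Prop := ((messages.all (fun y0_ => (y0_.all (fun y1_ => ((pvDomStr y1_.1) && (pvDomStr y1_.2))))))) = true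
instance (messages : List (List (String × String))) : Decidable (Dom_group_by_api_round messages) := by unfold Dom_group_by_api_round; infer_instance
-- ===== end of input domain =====

-- dict.get on the association-list encoding (first match, per the type convention)
def gbarGet (msg : List (String × String)) (k : String) : Option String := msg.lookup k

-- B replaces A's accumulate-emit state machine with compute-boundaries-then-slice; same cost, different decomposition.

-- ===== PORT A =====
-- one iteration of A's loop; state = (groups, current, last_aid)
def gbarStepA (st : List (List (List (String × String))) × List (List (String × String)) × Option String)
    (msg : List (String × String)) :
    List (List (List (String × String))) × List (List (String × String)) × Option String :=
  let role := gbarGet msg "role"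
  let mid := gbarGet msg "id"
  let st' :=
    if role = some "assistant" ∧ mid ≠ st.2.2 ∧ st.2.1 ≠ [] then
      (st.1 ++ [st.2.1], [msg], mid)
    else
      (st.1, st.2.1 ++ [msg], st.2.2)
  if role = some "assistant" then (st'.1, st'.2.1, mid) else st'

def group_by_api_round (messages : List (List (String × String))) : List (List (List (String × String))) :=
  let st := messages.foldl gbarStepA ([], [], none)
  if st.2.1 ≠ [] then st.1 ++ [st.2.1] else st.1

-- ===== PORT B =====
-- pass 1 step: state = (bounds, last_aid), input = (i, msg) from enumerate
def gbarStepBnd (st : List Int × Option String) (im : Int × List (String × String)) :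
    List Int × Option String :=
  if gbarGet im.2 "role" = some "assistant" then
    let mid := gbarGet im.2 "id"
    ((if mid ≠ st.2 ∧ im.1 > 0 then st.1 ++ [im.1] else st.1), mid)
  else st

-- pass 2 step: state = (groups, prev)
def gbarStepCut (messages : List (List (String × String)))
    (st : List (List (List (String × String))) × Int) (b : Int) :
    List (List (List (String × String))) × Int :=
  (st.1 ++ [PySem.List.slice messages (some st.2) (some b)], b)

def group_by_api_round_alt (messages : List (List (String × String))) : List (List (List (String × String))) :=
  let bounds := ((PySem.List.enumerate messages).foldl gbarStepBnd ([], none)).1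
  let st := bounds.foldl (gbarStepCut messages) ([], 0)
  if messages ≠ [] then st.1 ++ [PySem.List.slice messages (some st.2) none] else st.1

-- ===== PRECONDITION & SPEC =====
def Spec_group_by_api_round (messages : List (List (String × String))) (out : List (List (List (String × String)))) : Prop := out = group_by_api_round_alt messages
instance (messages : List (List (String × String))) (out : List (List (List (String × String)))) : Decidable (Spec_group_by_api_round messages out) := by unfold Spec_group_by_api_round; infer_instance

-- ===== CLAIM (what is proved, stated in full; the proofs are below) =====
def Claim_equal_group_by_api_round : Prop := ∀ (messages : List (List (String × String))), Dom_group_by_api_round messages → Spec_group_by_api_round messages (group_by_api_round messages)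


-- ===== LEMMAS AND PROOFS =====

-- proof-only abbreviations for B's two passes
def gbarBnd (ms : List (List (String × String))) : List Int × Option String :=
  (PySem.List.enumerate ms).foldl gbarStepBnd ([], none)

def gbarCut (ms : List (List (String × String))) : List (List (List (String × String))) × Int :=
  (gbarBnd ms).1.foldl (gbarStepCut ms) ([], 0)

lemma gbar_slice_append (L : List (List (String × String))) (m : List (String × String)) (a b : Int)
    (ha : 0 ≤ a) (ha' : a ≤ (L.length : Int)) (hb : 0 ≤ b) (hb' : b ≤ (L.length : Int)) :
    PySem.List.slice (L ++ [m]) (some a) (some b) = PySem.List.slice L (some a) (some b) := by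
  rw [PySem.List.slice_toNat (L ++ [m]) ha hb, PySem.List.slice_toNat L ha hb]
  rw [List.drop_append_of_le_length (by omega)]
  rw [List.take_append_of_le_length (by simp [List.length_drop]; omega)]

lemma gbar_cut_append (ms : List (List (String × String))) (m : List (String × String)) :
    ∀ (bs : List Int) (g : List (List (List (String × String)))) (prev : Int),
      0 ≤ prev → prev ≤ (ms.length : Int) →
      (∀ b ∈ bs, 0 ≤ b ∧ b ≤ (ms.length : Int)) →
      bs.foldl (gbarStepCut (ms ++ [m])) (g, prev) = bs.foldl (gbarStepCut ms) (g, prev) := by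
  intro bs
  induction bs with
  | nil => intro g prev _ _ _; rfl
  | cons b bs ih =>
    intro g prev h0 h1 hbs
    have hb := hbs b (by simp)
    simp only [List.foldl_cons, gbarStepCut]
    rw [gbar_slice_append ms m prev b h0 h1 hb.1 hb.2]
    exact ih _ b hb.1 hb.2 (fun x hx => hbs x (by simp [hx]))

lemma gbar_main (ms : List (List (String × String))) :
    ms.foldl gbarStepA ([], [], none)
      = ((gbarCut ms).1, ms.drop (gbarCut ms).2.toNat, (gbarBnd ms).2)
    ∧ (∀ b ∈ (gbarBnd ms).1, 1 ≤ b ∧ b < (ms.length : Int))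
    ∧ 0 ≤ (gbarCut ms).2 ∧ (gbarCut ms).2 ≤ (ms.length : Int)
    ∧ (ms ≠ [] → (gbarCut ms).2 < (ms.length : Int)) := by
  induction ms using List.reverseRecOn with
  | nil =>
    refine ⟨rfl, ?_, ?_, ?_, ?_⟩ <;>
      simp [gbarCut, gbarBnd, PySem.List.enumerate_nil]
  | append_singleton ms m ih =>
    obtain ⟨hA, hBs, hp0, hp1, hp2⟩ := ih
    have hbnd : gbarBnd (ms ++ [m]) = gbarStepBnd (gbarBnd ms) ((ms.length : Int), m) := by
      unfold gbarBnd
      rw [show PySem.List.enumerate (ms ++ [m]) 0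
            = PySem.List.enumerate ms 0 ++ [((ms.length : Int), m)] from by
        simp [PySem.List.enumerate_append, PySem.List.enumerate_cons, PySem.List.enumerate_nil]]
      rw [List.foldl_append]
      rfl
    have hfoldA : (ms ++ [m]).foldl gbarStepA ([], [], none)
        = gbarStepA (ms.foldl gbarStepA ([], [], none)) m := by
      rw [List.foldl_append]; rfl
    have hBs' : ∀ b ∈ (gbarBnd ms).1, 0 ≤ b ∧ b ≤ (ms.length : Int) := by
      intro b hb; have := hBs b hb; omega
    have hdropnat : (gbarCut ms).2.toNat ≤ ms.length := by omega
    have hdrop : (ms ++ [m]).drop (gbarCut ms).2.toNat = ms.drop (gbarCut ms).2.toNat ++ [m] := by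
      rw [List.drop_append_of_le_length hdropnat]
    by_cases hrole : gbarGet m "role" = some "assistant"
    · by_cases hcond : gbarGet m "id" ≠ (gbarBnd ms).2 ∧ ms ≠ []
      · -- boundary: a new round starts with m
        have hlen : (0 : Int) < (ms.length : Int) := by
          have : ms.length ≠ 0 := fun h => hcond.2 (List.eq_nil_of_length_eq_zero h)
          omega
        have hbnd2 : gbarBnd (ms ++ [m]) = ((gbarBnd ms).1 ++ [(ms.length : Int)], gbarGet m "id") := by
          rw [hbnd]
          simp only [gbarStepBnd]
          rw [if_pos hrole, if_pos ⟨hcond.1, hlen⟩]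
        have hcut2 : gbarCut (ms ++ [m])
            = ((gbarCut ms).1 ++ [PySem.List.slice (ms ++ [m]) (some (gbarCut ms).2) (some (ms.length : Int))], (ms.length : Int)) := by
          unfold gbarCut
          rw [hbnd2]
          simp only [List.foldl_append, List.foldl_cons, List.foldl_nil]
          rw [gbar_cut_append ms m (gbarBnd ms).1 [] 0 le_rfl (by omega) hBs']
          rfl
        have hslice : PySem.List.slice (ms ++ [m]) (some (gbarCut ms).2) (some (ms.length : Int))
            = ms.drop (gbarCut ms).2.toNat := by
          rw [PySem.List.slice_toNat (ms ++ [m]) hp0 (by omega)]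
          rw [List.drop_append_of_le_length hdropnat]
          rw [List.take_append_of_le_length (by simp only [List.length_drop]; omega)]
          simp [List.length_drop]
        have hcur : ms.drop (gbarCut ms).2.toNat ≠ [] := by
          have := hp2 hcond.2
          simp only [ne_eq, List.drop_eq_nil_iff]
          omega
        refine ⟨?_, ?_, ?_, ?_, ?_⟩
        · rw [hfoldA, hA]
          simp only [gbarStepA]
          rw [if_pos hrole, if_pos ⟨hrole, hcond.1, hcur⟩]
          rw [hcut2, hbnd2, hslice]
          simp
        · rw [hbnd2]
          intro b hb
          simp only [List.mem_append, List.mem_singleton] at hb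
          rcases hb with hb | hb
          · have := hBs b hb; simp only [List.length_append, List.length_singleton]; push_cast; omega
          · subst hb; simp only [List.length_append, List.length_singleton]; push_cast; omega
        · rw [hcut2]; omega
        · rw [hcut2]; simp only [List.length_append, List.length_singleton]; push_cast; omega
        · rw [hcut2]; intro _; simp only [List.length_append, List.length_singleton]; push_cast; omega
      · -- assistant, but no new round starts
        have hnb : ¬ (gbarGet m "id" ≠ (gbarBnd ms).2 ∧ ((ms.length : Int)) > 0) := by
          intro h
          apply hcond
          refine ⟨h.1, fun hnil => ?_⟩
          subst hnil
          exact absurd h.2 (by simp)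
        have hbnd2 : gbarBnd (ms ++ [m]) = ((gbarBnd ms).1, gbarGet m "id") := by
          rw [hbnd]
          simp only [gbarStepBnd]
          rw [if_pos hrole, if_neg hnb]
        have hcut2 : gbarCut (ms ++ [m]) = gbarCut ms := by
          unfold gbarCut
          rw [hbnd2]
          exact gbar_cut_append ms m (gbarBnd ms).1 [] 0 le_rfl (by omega) hBs'
        have hnA : ¬ (gbarGet m "role" = some "assistant" ∧ gbarGet m "id" ≠ (gbarBnd ms).2 ∧ ms.drop (gbarCut ms).2.toNat ≠ []) := by
          intro h
          apply hnb
          refine ⟨h.2.1, ?_⟩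
          have hne : ms ≠ [] := fun hnil => h.2.2 (by subst hnil; simp)
          have : ms.length ≠ 0 := fun hz => hne (List.eq_nil_of_length_eq_zero hz)
          omega
        refine ⟨?_, ?_, ?_, ?_, ?_⟩
        · rw [hfoldA, hA]
          simp only [gbarStepA]
          rw [if_pos hrole, if_neg hnA]
          rw [hcut2, hbnd2, hdrop]
        · rw [hbnd2]
          intro b hb
          have := hBs b hb
          simp only [List.length_append, List.length_singleton]; push_cast; omega
        · rw [hcut2]; omega
        · rw [hcut2]; simp only [List.length_append, List.length_singleton]; push_cast; omega
        · rw [hcut2]; intro _; simp only [List.length_append, List.length_singleton]; push_cast; omega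
    · -- not an assistant message
      have hbnd2 : gbarBnd (ms ++ [m]) = gbarBnd ms := by
        rw [hbnd]
        simp only [gbarStepBnd]
        rw [if_neg hrole]
      have hcut2 : gbarCut (ms ++ [m]) = gbarCut ms := by
        unfold gbarCut
        rw [hbnd2]
        exact gbar_cut_append ms m (gbarBnd ms).1 [] 0 le_rfl (by omega) hBs'
      have hnA : ¬ (gbarGet m "role" = some "assistant" ∧ gbarGet m "id" ≠ (gbarBnd ms).2 ∧ ms.drop (gbarCut ms).2.toNat ≠ []) := fun h => hrole h.1
      refine ⟨?_, ?_, ?_, ?_, ?_⟩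
      · rw [hfoldA, hA]
        simp only [gbarStepA]
        rw [if_neg hnA, if_neg hrole]
        rw [hcut2, hbnd2, hdrop]
      · rw [hbnd2]
        intro b hb
        have := hBs b hb
        simp only [List.length_append, List.length_singleton]; push_cast; omega
      · rw [hcut2]; omega
      · rw [hcut2]; simp only [List.length_append, List.length_singleton]; push_cast; omega
      · rw [hcut2]; intro _; simp only [List.length_append, List.length_singleton]; push_cast; omega

lemma gbar_alt_eq (ms : List (List (String × String))) :
    group_by_api_round_alt ms
      = (if ms ≠ [] then (gbarCut ms).1 ++ [PySem.List.slice ms (some (gbarCut ms).2) none] else (gbarCut ms).1) := rfl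

-- ===== VERDICT (by name: the statement is the Claim_ definition above) =====
theorem group_by_api_round_spec : Claim_equal_group_by_api_round := by
  intro ms _
  unfold Spec_group_by_api_round
  obtain ⟨hA, hBs, hp0, hp1, hp2⟩ := gbar_main ms
  show group_by_api_round ms = group_by_api_round_alt ms
  by_cases hms : ms = []
  · subst hms; rfl
  · have hcur : ms.drop (gbarCut ms).2.toNat ≠ [] := by
      have := hp2 hms
      simp only [ne_eq, List.drop_eq_nil_iff]
      omega
    have hAeq : group_by_api_round ms = (gbarCut ms).1 ++ [ms.drop (gbarCut ms).2.toNat] := by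
      unfold group_by_api_round
      rw [hA]
      exact if_pos hcur
    rw [hAeq, gbar_alt_eq, if_pos hms, PySem.List.slice_from ms hp0]
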